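-- pv_equiv track=rewrite | github.com/5ubterranean/nuclei2zap | nuclei2zap.py | path_variable
-- ===== SOURCE A (Python) =====
-- def path_variable(URL):
--     #Looks for nuclei path variables and replacing them for template literals
--     URLvariables = ['{{BaseURL}}','{{RootURL}}','{{Hostname}}','{{Host}}','{{Port}}','{{Path}}','{{File}}','{{Scheme}}']
--     for var in URLvariables:
--         if var == '{{BaseURL}}':
--             URL = URL.replace('{{BaseURL}}','${BaseURL}')
--         elif var == '{{RootURL}}':
--             URL = URL.replace('{{RootURL}}','${RootURL}')
--         elif var == '{{Hostname}}':
--             URL = URL.replace('{{Hostname}}','${Hostname}')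
--         elif var == '{{Host}}':
--             URL = URL.replace('{{Host}}','${Host}')
--         elif var == '{{Port}}':
--             URL = URL.replace('{{Port}}','${Port}')
--         elif var == '{{Path}}':
--             URL = URL.replace('{{Path}}','${Path}')
--         elif var == '{{File}}':
--             URL = URL.replace('{{File}}','${FileName}')
--         elif var == '{{Scheme}}':
--             URL = URL.replace('{{Scheme}}','${Scheme}')
--     return URL
-- ===== SOURCE B (Python) =====
-- RULES = [
--     ('{{BaseURL}}', '${BaseURL}'),
--     ('{{RootURL}}', '${RootURL}'),
--     ('{{Hostname}}', '${Hostname}'),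
--     ('{{Host}}', '${Host}'),
--     ('{{Port}}', '${Port}'),
--     ('{{Path}}', '${Path}'),
--     ('{{File}}', '${FileName}'),
--     ('{{Scheme}}', '${Scheme}'),
-- ]
--
-- def path_variable(URL):
--     # One left-to-right scan: at each position substitute the first rule
--     # whose nuclei token starts there, otherwise copy the character.
--     out = []
--     i = 0
--     n = len(URL)
--     while i < n:
--         for tok, rep in RULES:
--             if URL.startswith(tok, i):
--                 out.append(rep)
--                 i += len(tok)
--                 break
--         else:
--             out.append(URL[i])
--             i += 1
--     return ''.join(out)
-- ===== Notes on version B (the rewrite author's own statement) =====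
-- stated objective: idiomatic
-- what changed: Replaced eight sequential full-string str.replace passes (inside an if/elif chain over the token list) by a single left-to-right scan driven by a token->literal rule table, substituting the first matching token at each position.
import Mathlib
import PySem

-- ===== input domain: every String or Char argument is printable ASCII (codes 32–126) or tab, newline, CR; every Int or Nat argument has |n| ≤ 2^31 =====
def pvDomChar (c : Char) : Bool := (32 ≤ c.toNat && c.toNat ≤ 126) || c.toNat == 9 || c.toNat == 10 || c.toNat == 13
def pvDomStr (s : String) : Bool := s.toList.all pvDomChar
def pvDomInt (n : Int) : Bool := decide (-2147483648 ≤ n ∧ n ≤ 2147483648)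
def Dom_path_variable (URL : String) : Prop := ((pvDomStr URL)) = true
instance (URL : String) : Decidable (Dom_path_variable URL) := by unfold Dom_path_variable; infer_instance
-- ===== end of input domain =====

-- B replaces A's eight sequential full-string replace passes by one left-to-right scan
-- over a token -> template-literal rule table (objective: idiomatic; same return value).

-- ===== PORT A =====
-- A: for each var in the list, an if/elif chain performs one full-string str.replace.
def path_variable (URL : String) : String :=
  let URLvariables : List String :=
    ["{{BaseURL}}", "{{RootURL}}", "{{Hostname}}", "{{Host}}", "{{Port}}", "{{Path}}", "{{File}}", "{{Scheme}}"]
  URLvariables.foldl (fun URL var =>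
    if var = "{{BaseURL}}" then PySem.Str.replace URL "{{BaseURL}}" "${BaseURL}"
    else if var = "{{RootURL}}" then PySem.Str.replace URL "{{RootURL}}" "${RootURL}"
    else if var = "{{Hostname}}" then PySem.Str.replace URL "{{Hostname}}" "${Hostname}"
    else if var = "{{Host}}" then PySem.Str.replace URL "{{Host}}" "${Host}"
    else if var = "{{Port}}" then PySem.Str.replace URL "{{Port}}" "${Port}"
    else if var = "{{Path}}" then PySem.Str.replace URL "{{Path}}" "${Path}"
    else if var = "{{File}}" then PySem.Str.replace URL "{{File}}" "${FileName}"
    else if var = "{{Scheme}}" then PySem.Str.replace URL "{{Scheme}}" "${Scheme}"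
    else URL) URL

-- ===== PORT B =====
-- B's rule table: (nuclei token, template literal), in B's priority order.
def pvRules : List (List Char × List Char) :=
  [("{{BaseURL}}".toList, "${BaseURL}".toList),
   ("{{RootURL}}".toList, "${RootURL}".toList),
   ("{{Hostname}}".toList, "${Hostname}".toList),
   ("{{Host}}".toList, "${Host}".toList),
   ("{{Port}}".toList, "${Port}".toList),
   ("{{Path}}".toList, "${Path}".toList),
   ("{{File}}".toList, "${FileName}".toList),
   ("{{Scheme}}".toList, "${Scheme}".toList)]

-- B's while loop: at each position emit the first matching rule's literal (advancing
-- past the token), otherwise copy one character.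
def pvScanB (s : List Char) : List Char :=
  match s with
  | [] => []
  | c :: t =>
    match pvRules.find? (fun r => r.1.isPrefixOf (c :: t)) with
    | some (tok, rep) => rep ++ pvScanB (t.drop (tok.length - 1))
    | none => c :: pvScanB t
termination_by s.length
decreasing_by
  all_goals simp

def path_variable_alt (URL : String) : String :=
  String.ofList (pvScanB URL.toList)

-- ===== PRECONDITION & SPEC =====
def Spec_path_variable (URL : String) (out : String) : Prop := out = path_variable_alt URL
instance (URL : String) (out : String) : Decidable (Spec_path_variable URL out) := by unfold Spec_path_variable; infer_instance

-- ===== CLAIM (what is proved, stated in full; the proofs are below) =====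
def Claim_equal_path_variable : Prop := ∀ (URL : String), Dom_path_variable URL → Spec_path_variable URL (path_variable URL)

-- ===== LEMMAS AND PROOFS =====

-- Pure single-token scan: what one Python str.replace pass computes.
def pvScan (tok rep : List Char) (s : List Char) : List Char :=
  match s with
  | [] => []
  | c :: t =>
    if tok.isPrefixOf (c :: t) then rep ++ pvScan tok rep (t.drop (tok.length - 1))
    else c :: pvScan tok rep t
termination_by s.length
decreasing_by
  all_goals simp

theorem pvScan_nil (tok rep : List Char) : pvScan tok rep [] = [] := by
  rw [pvScan.eq_def]

theorem pvScan_cons (tok rep : List Char) (c : Char) (t : List Char) :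
    pvScan tok rep (c :: t) =
      if tok.isPrefixOf (c :: t) then rep ++ pvScan tok rep (t.drop (tok.length - 1))
      else c :: pvScan tok rep t := by
  rw [pvScan.eq_def]

theorem pvReplaceGo_eq_scan (old new : List Char) (h : old ≠ []) :
    ∀ fuel l acc, l.length ≤ fuel →
      PySem.Chars.replace.go old new fuel l acc = acc.reverse ++ pvScan old new l := by
  intro fuel
  induction fuel with
  | zero =>
    intro l acc hl
    have : l = [] := List.length_eq_zero_iff.mp (Nat.le_zero.mp hl)
    subst this
    simp [PySem.Chars.replace.go, pvScan_nil]
  | succ n ih =>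
    intro l acc hl
    match l with
    | [] => simp [PySem.Chars.replace.go, pvScan_nil]
    | c :: t =>
      rw [pvScan_cons]
      by_cases hp : old.isPrefixOf (c :: t)
      · rw [PySem.Chars.replace.go]
        simp only [hp, if_true]
        have hlen : (List.drop old.length (c :: t)).length ≤ n := by
          have h1 : 1 ≤ old.length := List.length_pos_iff.mpr h
          have h2 : t.length + 1 ≤ n + 1 := by simpa using hl
          simp only [List.length_drop, List.length_cons]
          omega
        rw [ih _ _ hlen]
        have hdrop : List.drop old.length (c :: t) = List.drop (old.length - 1) t := by
          have : 1 ≤ old.length := List.length_pos_iff.mpr h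
          cases old with
          | nil => exact absurd rfl h
          | cons a o' => simp
        rw [hdrop]
        simp
      · rw [PySem.Chars.replace.go]
        simp only [hp]
        have hlen : t.length ≤ n := by simp at hl; omega
        rw [ih _ _ hlen]
        simp

theorem pvReplace_eq_scan (s old new : List Char) (h : old ≠ []) :
    PySem.Chars.replace s old new = pvScan old new s := by
  rw [PySem.Chars.replace, if_neg (by simpa [List.isEmpty_iff] using h)]
  simpa using pvReplaceGo_eq_scan old new h s.length s [] le_rfl

abbrev pvAgree (a b : List Char) : Prop := a.take b.length = b.take a.length

theorem pvAgree_of_prefix_append {tok u X : List Char} (h : tok <+: u ++ X) : pvAgree tok u := by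
  obtain ⟨v, hv⟩ := h
  unfold pvAgree
  apply List.ext_getElem
  · simp [Nat.min_comm]
  · intro i h1 h2
    simp only [List.getElem_take]
    have hiu : i < u.length := by simp at h1; omega
    have hit : i < tok.length := by simp at h2; omega
    have : (tok ++ v)[i]'(by simp; omega) = (u ++ X)[i]'(by simp; omega) := by
      congr 1
    rw [List.getElem_append_left hit] at this
    rw [List.getElem_append_left hiu] at this
    exact this

theorem pvScan_passthrough (tok rep : List Char) :
    ∀ (p X : List Char), (∀ i < p.length, ¬ pvAgree tok (p.drop i)) →
    pvScan tok rep (p ++ X) = p ++ pvScan tok rep X := by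
  intro p
  induction p with
  | nil => intro X h; simp
  | cons c p' ih =>
    intro X h
    have hnp : ¬ tok.isPrefixOf ((c :: p') ++ X) := by
      intro hp
      exact h 0 (by simp) (by simpa using pvAgree_of_prefix_append (List.isPrefixOf_iff_prefix.mp hp))
    rw [List.cons_append, pvScan_cons, if_neg (by simpa using hnp)]
    rw [ih X (fun i hi => h (i + 1) (by simp; omega))]
    simp

theorem pvScan_self (tok rep Z : List Char) (h : tok ≠ []) :
    pvScan tok rep (tok ++ Z) = rep ++ pvScan tok rep Z := by
  cases tok with
  | nil => exact absurd rfl h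
  | cons a tok' =>
    have hpre : (a :: tok').isPrefixOf (a :: (tok' ++ Z)) = true :=
      List.isPrefixOf_iff_prefix.mpr ⟨Z, rfl⟩
    rw [List.cons_append, pvScan_cons, if_pos hpre]
    simp

theorem pvPrefix_of_prefix_scan (tok rep : List Char) (hr : rep.head? = some '$') :
    ∀ u q, '$' ∉ q → q <+: pvScan tok rep u → q <+: u := by
  intro u
  induction u with
  | nil => intro q hq hpre; exact pvScan_nil tok rep ▸ hpre
  | cons c t ih =>
    intro q hq hpre
    rw [pvScan_cons] at hpre
    split at hpre
    · match q, hq, hpre with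
      | [], _, _ => exact List.nil_prefix
      | a :: q', hq, hpre =>
        exfalso
        obtain ⟨w, hw⟩ := hpre
        cases rep with
        | nil => simp at hr
        | cons r0 rrest =>
          have hh := congrArg List.head? hw
          simp only [List.cons_append, List.head?_cons, Option.some.injEq] at hh
          simp only [List.head?_cons, Option.some.injEq] at hr
          exact hq (by simp [hh, hr])
    · match q, hq, hpre with
      | [], _, _ => exact List.nil_prefix
      | a :: q', hq, hpre =>
        obtain ⟨w, hw⟩ := hpre
        have ha : a = c := by
          have hh := congrArg List.head? hw
          simpa only [List.cons_append, List.head?_cons, Option.some.injEq] using hh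
        have hq' : '$' ∉ q' := fun hm => hq (List.mem_cons_of_mem _ hm)
        have hpre' : q' <+: pvScan tok rep t := by
          refine ⟨w, ?_⟩
          have := congrArg List.tail hw
          simpa using this
        have ht := ih q' hq' hpre'
        subst ha
        exact List.cons_prefix_cons.mpr ⟨rfl, ht⟩

theorem pvScanB_nil : pvScanB [] = [] := by rw [pvScanB.eq_def]

theorem pvScanB_cons (c : Char) (t : List Char) :
    pvScanB (c :: t) =
      match pvRules.find? (fun r => r.1.isPrefixOf (c :: t)) with
      | some (tok, rep) => rep ++ pvScanB (t.drop (tok.length - 1))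
      | none => c :: pvScanB t := by
  rw [pvScanB.eq_def]

def pvChain (rules : List (List Char × List Char)) (s : List Char) : List Char :=
  rules.foldl (fun s r => pvScan r.1 r.2 s) s

theorem pvChain_cons_rules (a : List Char × List Char) (rs : List (List Char × List Char))
    (s : List Char) : pvChain (a :: rs) s = pvChain rs (pvScan a.1 a.2 s) := rfl

theorem pvChain_append_rules (l1 l2 : List (List Char × List Char)) (s : List Char) :
    pvChain (l1 ++ l2) s = pvChain l2 (pvChain l1 s) := by
  simp [pvChain, List.foldl_append]

theorem pvChain_nil_str (rules : List (List Char × List Char)) : pvChain rules [] = [] := by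
  induction rules with
  | nil => rfl
  | cons a rs ih => rw [pvChain_cons_rules, pvScan_nil, ih]

theorem pvPrefix_cons_scan (tok rep : List Char) (hr : rep.head? = some '$')
    (q : List Char) (c : Char) (t : List Char) (hq : '$' ∉ q) :
    q <+: c :: pvScan tok rep t → q <+: c :: t := by
  intro hpre
  match q, hq, hpre with
  | [], _, _ => exact List.nil_prefix
  | a :: q', hq, hpre =>
    obtain ⟨hac, hq'pre⟩ := List.cons_prefix_cons.mp hpre
    exact List.cons_prefix_cons.mpr
      ⟨hac, pvPrefix_of_prefix_scan tok rep hr t q'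
        (fun m => hq (List.mem_cons_of_mem _ m)) hq'pre⟩

theorem pvChain_noMatch (c : Char) :
    ∀ (rules : List (List Char × List Char)) (t : List Char),
      (∀ r ∈ rules, ¬ r.1 <+: (c :: t) ∧ '$' ∉ r.1 ∧ r.2.head? = some '$') →
      pvChain rules (c :: t) = c :: pvChain rules t := by
  intro rules
  induction rules with
  | nil => intro t h; rfl
  | cons a rs ih =>
    intro t h
    have h0 := h a List.mem_cons_self
    rw [pvChain_cons_rules, pvScan_cons,
      if_neg (by simpa [List.isPrefixOf_iff_prefix] using h0.1)]
    rw [ih (pvScan a.1 a.2 t) ?_, pvChain_cons_rules]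
    intro r hr
    have hr' := h r (List.mem_cons_of_mem _ hr)
    refine ⟨?_, hr'.2.1, hr'.2.2⟩
    intro hpre
    exact hr'.1 (pvPrefix_cons_scan a.1 a.2 h0.2.2 r.1 c t hr'.2.1 hpre)

theorem pvChain_passthrough (p : List Char) :
    ∀ (rules : List (List Char × List Char)) (X : List Char),
      (∀ r ∈ rules, ∀ i < p.length, ¬ pvAgree r.1 (p.drop i)) →
      pvChain rules (p ++ X) = p ++ pvChain rules X := by
  intro rules
  induction rules with
  | nil => intro X h; rfl
  | cons a rs ih =>
    intro X h
    rw [pvChain_cons_rules, pvScan_passthrough a.1 a.2 p X (h a List.mem_cons_self),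
      ih _ (fun r hr => h r (List.mem_cons_of_mem _ hr)), pvChain_cons_rules]

theorem pvFact_nonempty : ∀ r ∈ pvRules, r.1 ≠ [] ∧ '$' ∉ r.1 ∧ r.2.head? = some '$' := by
  decide

theorem pvFact_token_indep : ∀ a ∈ pvRules, ∀ b ∈ pvRules, a.1 ≠ b.1 → ¬ pvAgree a.1 b.1 := by
  decide

theorem pvFact_token_inner :
    ∀ a ∈ pvRules, ∀ b ∈ pvRules, ∀ i < b.1.length, 0 < i → ¬ pvAgree a.1 (b.1.drop i) := by
  decide

theorem pvFact_rep : ∀ a ∈ pvRules, ∀ b ∈ pvRules, ∀ i < b.2.length, ¬ pvAgree a.1 (b.2.drop i) := by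
  decide

theorem pvMain : ∀ (n : Nat) (s : List Char), s.length ≤ n → pvChain pvRules s = pvScanB s := by
  intro n
  induction n with
  | zero =>
    intro s hs
    have : s = [] := List.length_eq_zero_iff.mp (Nat.le_zero.mp hs)
    subst this
    rw [pvChain_nil_str, pvScanB_nil]
  | succ n ih =>
    intro s hs
    match s with
    | [] => rw [pvChain_nil_str, pvScanB_nil]
    | c :: t =>
      cases hfind : pvRules.find? (fun r => r.1.isPrefixOf (c :: t)) with
      | none =>
        have hall := List.find?_eq_none.mp hfind
        rw [pvScanB_cons, hfind]
        rw [pvChain_noMatch c pvRules t ?_]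
        · rw [ih t (by simpa using Nat.lt_succ_iff.mp (by simpa using hs))]
        · intro r hr
          have := pvFact_nonempty r hr
          exact ⟨fun hp => (hall r hr) (by simpa [List.isPrefixOf_iff_prefix] using hp),
            this.2.1, this.2.2⟩
      | some r =>
        obtain ⟨tok, rep⟩ := r
        obtain ⟨hP, pre, post, hsplit, hpre_none⟩ := List.find?_eq_some_iff_append.mp hfind
        have hmem : (tok, rep) ∈ pvRules := by
          rw [hsplit]; exact List.mem_append_right _ List.mem_cons_self
        have hfacts := pvFact_nonempty (tok, rep) hmem
        have htoknil : tok ≠ [] := hfacts.1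
        have htok : tok <+: c :: t := List.isPrefixOf_iff_prefix.mp hP
        obtain ⟨m, hm⟩ : ∃ m, tok.length = m + 1 := by
          cases hlen : tok.length with
          | zero => exact absurd (List.length_eq_zero_iff.mp hlen) htoknil
          | succ m => exact ⟨m, rfl⟩
        have hrest : (c :: t).drop tok.length = t.drop (tok.length - 1) := by
          rw [hm]; simp
        have hs_eq : c :: t = tok ++ (c :: t).drop tok.length := by
          conv_lhs => rw [← List.take_append_drop tok.length (c :: t)]
          rw [← List.prefix_iff_eq_take.mp htok]
        rw [pvScanB_cons, hfind]
        show pvChain pvRules (c :: t) = rep ++ pvScanB (List.drop (tok.length - 1) t)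
        rw [← hrest]
        set rest := (c :: t).drop tok.length with hrestdef
        -- pass-through conditions
        have hpreCond : ∀ r' ∈ pre, ∀ i < tok.length, ¬ pvAgree r'.1 (tok.drop i) := by
          intro r' hr' i hi
          have hr'mem : r' ∈ pvRules := by
            rw [hsplit]; exact List.mem_append_left _ hr'
          cases Nat.eq_zero_or_pos i with
          | inl h0 =>
            subst h0
            simp only [List.drop_zero]
            have hne : r'.1 ≠ tok := by
              intro he
              have := hpre_none r' hr'
              rw [he] at this
              simp [hP] at this
            exact pvFact_token_indep r' hr'mem (tok, rep) hmem hne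
          | inr hpos => exact pvFact_token_inner r' hr'mem (tok, rep) hmem i hi hpos
        have hpostCond : ∀ r' ∈ post, ∀ i < rep.length, ¬ pvAgree r'.1 (rep.drop i) := by
          intro r' hr' i hi
          have hr'mem : r' ∈ pvRules := by
            rw [hsplit]
            exact List.mem_append_right _ (List.mem_cons_of_mem _ hr')
          exact pvFact_rep r' hr'mem (tok, rep) hmem i hi
        calc pvChain pvRules (c :: t)
            = pvChain post (pvScan tok rep (pvChain pre (tok ++ rest))) := by
              rw [hsplit, pvChain_append_rules, pvChain_cons_rules, ← hs_eq]
          _ = pvChain post (pvScan tok rep (tok ++ pvChain pre rest)) := by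
              rw [pvChain_passthrough tok pre rest hpreCond]
          _ = pvChain post (rep ++ pvScan tok rep (pvChain pre rest)) := by
              rw [pvScan_self tok rep _ htoknil]
          _ = rep ++ pvChain post (pvScan tok rep (pvChain pre rest)) := by
              rw [pvChain_passthrough rep post _ hpostCond]
          _ = rep ++ pvChain pvRules rest := by
              rw [hsplit, pvChain_append_rules, pvChain_cons_rules]
          _ = rep ++ pvScanB rest := by
              rw [ih rest ?_]
              have : rest.length = t.length + 1 - tok.length := by
                rw [hrestdef]; simp
              have ht : t.length + 1 ≤ n + 1 := by simpa using hs
              omega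

theorem pvChain_eq_scanB (s : List Char) : pvChain pvRules s = pvScanB s :=
  pvMain s.length s le_rfl

theorem pvA_eq_chain (URL : String) :
    (path_variable URL).toList = pvChain pvRules URL.toList := by
  have : path_variable URL =
      PySem.Str.replace (PySem.Str.replace (PySem.Str.replace (PySem.Str.replace
        (PySem.Str.replace (PySem.Str.replace (PySem.Str.replace (PySem.Str.replace URL
          "{{BaseURL}}" "${BaseURL}") "{{RootURL}}" "${RootURL}") "{{Hostname}}" "${Hostname}")
          "{{Host}}" "${Host}") "{{Port}}" "${Port}") "{{Path}}" "${Path}")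
          "{{File}}" "${FileName}") "{{Scheme}}" "${Scheme}" := by
    simp [path_variable]
  rw [this]
  simp only [PySem.Str.toList_replace]
  rw [pvReplace_eq_scan _ _ _ (by decide), pvReplace_eq_scan _ _ _ (by decide),
    pvReplace_eq_scan _ _ _ (by decide), pvReplace_eq_scan _ _ _ (by decide),
    pvReplace_eq_scan _ _ _ (by decide), pvReplace_eq_scan _ _ _ (by decide),
    pvReplace_eq_scan _ _ _ (by decide), pvReplace_eq_scan _ _ _ (by decide)]
  simp [pvChain, pvRules, List.foldl]

-- ===== VERDICT (by name: the statement is the Claim_ definition above) =====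
theorem path_variable_spec : Claim_equal_path_variable := by
  intro URL _
  unfold Spec_path_variable
  have h := pvA_eq_chain URL
  rw [pvChain_eq_scanB] at h
  unfold path_variable_alt
  rw [← h, String.ofList_toList]
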